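-- pv_equiv track=rewrite | github.com/jchen610/CS435 | assignment1/assignment1.py | left_shift_matrix
-- ===== SOURCE A (Python) =====
-- def left_shift_matrix(matrix, shift):
--     shifted_matrix = []
--     for row in matrix:
--         n = len(row)
--         shifted_row = [0] * n
--         for i in range(n):
--             shifted_row[i] = row[(i + shift) % n]
--         shifted_matrix.append(shifted_row)
--     return shifted_matrix
-- ===== SOURCE B (Python) =====
-- def left_shift_matrix(matrix, shift):
--     def rot(row):
--         if not row:
--             return []
--         k = shift % len(row)
--         return row[k:] + row[:k]
--     return [rot(row) for row in matrix]
-- ===== Notes on version B (the rewrite author's own statement) =====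
-- stated objective: idiomatic
-- what changed: Replaces the per-element modular-index loop that fills a preallocated row with a split-and-concatenate of two contiguous slices (row[k:] + row[:k] with k = shift % len(row)), done in a comprehension over the matrix.
import Mathlib
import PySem

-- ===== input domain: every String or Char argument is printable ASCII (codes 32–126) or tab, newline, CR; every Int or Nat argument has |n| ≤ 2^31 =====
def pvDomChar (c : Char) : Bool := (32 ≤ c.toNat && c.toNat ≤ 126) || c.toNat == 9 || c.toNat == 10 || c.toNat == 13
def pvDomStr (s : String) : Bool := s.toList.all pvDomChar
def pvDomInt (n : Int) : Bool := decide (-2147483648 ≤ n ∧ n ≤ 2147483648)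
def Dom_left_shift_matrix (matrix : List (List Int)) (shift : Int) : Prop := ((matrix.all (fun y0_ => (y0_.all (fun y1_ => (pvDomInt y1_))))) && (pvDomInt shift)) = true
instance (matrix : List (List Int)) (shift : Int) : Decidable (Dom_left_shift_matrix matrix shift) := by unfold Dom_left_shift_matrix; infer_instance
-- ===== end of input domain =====

-- B replaces A's per-element modular-index fill with a split-and-concatenate of two slices; same cost, more idiomatic.

-- ===== PORT A =====
-- A fills a preallocated row [0]*n by assigning index i = 0..n-1 in order; that fill is
-- ported as a map over the index range (each index written exactly once, in order).
def left_shift_matrix (matrix : List (List Int)) (shift : Int) : List (List Int) :=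
  matrix.foldl (fun shifted_matrix row =>
    let n : Int := row.length
    let shifted_row : List Int :=
      (PySem.List.pyRange 0 n 1).map
        (fun i => (PySem.List.pyGet? row (PySem.Int.mod (i + shift) n)).getD 0)
    shifted_matrix ++ [shifted_row]) []

-- ===== PORT B =====
def pvRotRow (shift : Int) (row : List Int) : List Int :=
  if row = [] then []
  else
    let k : Int := PySem.Int.mod shift (row.length : Int)
    PySem.List.slice row (some k) none ++ PySem.List.slice row none (some k)

def left_shift_matrix_alt (matrix : List (List Int)) (shift : Int) : List (List Int) :=
  matrix.map (pvRotRow shift)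

-- ===== PRECONDITION & SPEC =====
def Spec_left_shift_matrix (matrix : List (List Int)) (shift : Int) (out : List (List Int)) : Prop := out = left_shift_matrix_alt matrix shift
instance (matrix : List (List Int)) (shift : Int) (out : List (List Int)) : Decidable (Spec_left_shift_matrix matrix shift out) := by unfold Spec_left_shift_matrix; infer_instance

-- ===== CLAIM (what is proved, stated in full; the proofs are below) =====
def Claim_equal_left_shift_matrix : Prop := ∀ (matrix : List (List Int)) (shift : Int), Dom_left_shift_matrix matrix shift → Spec_left_shift_matrix matrix shift (left_shift_matrix matrix shift)

-- ===== LEMMAS AND PROOFS =====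

-- A's per-index modular fill of one non-empty row is the rotation by k = shift mod len.
theorem pvRowA_eq_rotate (row : List Int) (shift : Int) (hne : row ≠ []) :
    (PySem.List.pyRange 0 (row.length : Int) 1).map
        (fun i => (PySem.List.pyGet? row (PySem.Int.mod (i + shift) (row.length : Int))).getD 0)
      = row.rotate (PySem.Int.mod shift (row.length : Int)).toNat := by
  have hlen : 0 < row.length := List.length_pos_iff.mpr hne
  have hL : (0 : Int) < (row.length : Int) := by exact_mod_cast hlen
  set k : Nat := (PySem.Int.mod shift (row.length : Int)).toNat with hk
  have hkcast : ((k : Nat) : Int) = shift % (row.length : Int) := by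
    rw [hk, Int.toNat_of_nonneg (PySem.Int.mod_nonneg shift hL), PySem.Int.mod_eq_emod_of_pos hL]
  rw [PySem.List.pyRange_zero_natCast, List.map_map]
  apply List.ext_getElem
  · simp only [List.length_map, List.length_range, List.length_rotate]
  · intro j h1 h2
    simp only [List.getElem_map, List.getElem_range, Function.comp_apply]
    have hj : j < row.length := by simpa using h1
    have hidx : PySem.Int.mod ((j : Int) + shift) (row.length : Int)
        = (((j + k) % row.length : Nat) : Int) := by
      rw [PySem.Int.mod_eq_emod_of_pos hL]
      push_cast
      rw [Int.add_emod (j : Int) shift, Int.add_emod (j : Int) (k : Int), hkcast,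
        Int.emod_emod_of_dvd shift dvd_rfl]
    rw [hidx, PySem.List.pyGet?_natCast]
    have hm : (j + k) % row.length < row.length := Nat.mod_lt _ hlen
    rw [List.getElem?_eq_getElem hm]
    have hrot := List.getElem_rotate row k j (by simpa [List.length_rotate] using hj)
    simp only [Option.getD_some]
    rw [List.getElem_rotate]

-- B's two slices of one non-empty row are the same rotation.
theorem pvRowB_eq_rotate (row : List Int) (shift : Int) (hne : row ≠ []) :
    pvRotRow shift row = row.rotate (PySem.Int.mod shift (row.length : Int)).toNat := by
  have hlen : 0 < row.length := List.length_pos_iff.mpr hne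
  have hL : (0 : Int) < (row.length : Int) := by exact_mod_cast hlen
  have hk0 : 0 ≤ PySem.Int.mod shift (row.length : Int) := PySem.Int.mod_nonneg shift hL
  have hklt : (PySem.Int.mod shift (row.length : Int)).toNat ≤ row.length := by
    have := PySem.Int.mod_lt shift hL
    omega
  rw [pvRotRow, if_neg hne]
  simp only
  rw [PySem.List.slice_from row hk0, PySem.List.slice_to row hk0,
    List.rotate_eq_drop_append_take hklt]

-- ===== VERDICT (by name: the statement is the Claim_ definition above) =====
theorem left_shift_matrix_spec : Claim_equal_left_shift_matrix := by
  intro matrix shift _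
  unfold Spec_left_shift_matrix left_shift_matrix left_shift_matrix_alt
  rw [PySem.List.foldl_append_singleton_eq_map, List.nil_append]
  apply List.map_congr_left
  intro row _
  by_cases hne : row = []
  · subst hne
    simp [pvRotRow, PySem.List.pyRange]
  · rw [pvRowA_eq_rotate row shift hne, pvRowB_eq_rotate row shift hne]
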